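-- pv_equiv track=rewrite | github.com/arbi-mansour/speaking_bot1 | main.py | find_best_paragraph
-- ===== SOURCE A (Python) =====
-- def find_best_paragraph(query, paragraphs):
--     query_words = set(query.lower().split())
--     best_score = 0
--     best_para = "Sorry, I don't know how to answer that yet."
--     for para in paragraphs:
--         para_words = set(para.lower().split())
--         score = len(query_words & para_words)
--         if score > best_score:
--             best_score = score
--             best_para = para
--     return best_para
-- ===== SOURCE B (Python) =====
-- def find_best_paragraph(query, paragraphs):
--     # Inverted index: word -> list of indices of paragraphs containing it.
--     index = {}
--     for i, para in enumerate(paragraphs):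
--         for w in set(para.lower().split()):
--             index[w] = index.get(w, []) + [i]
--     scores = [0] * len(paragraphs)
--     for w in set(query.lower().split()):
--         for i in index.get(w, []):
--             scores[i] += 1
--     best_score = 0
--     best_para = "Sorry, I don't know how to answer that yet."
--     for score, para in zip(scores, paragraphs):
--         if score > best_score:
--             best_score = score
--             best_para = para
--     return best_para
-- ===== Notes on version B (the rewrite author's own statement) =====
-- stated objective: alternative
-- what changed: Replaces A's per-paragraph set-intersection loop with an inverted index (word -> paragraph indices) built in one pass, a score array incremented per distinct query word, and a final strict-max scan over zip(scores, paragraphs).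
import Mathlib
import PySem

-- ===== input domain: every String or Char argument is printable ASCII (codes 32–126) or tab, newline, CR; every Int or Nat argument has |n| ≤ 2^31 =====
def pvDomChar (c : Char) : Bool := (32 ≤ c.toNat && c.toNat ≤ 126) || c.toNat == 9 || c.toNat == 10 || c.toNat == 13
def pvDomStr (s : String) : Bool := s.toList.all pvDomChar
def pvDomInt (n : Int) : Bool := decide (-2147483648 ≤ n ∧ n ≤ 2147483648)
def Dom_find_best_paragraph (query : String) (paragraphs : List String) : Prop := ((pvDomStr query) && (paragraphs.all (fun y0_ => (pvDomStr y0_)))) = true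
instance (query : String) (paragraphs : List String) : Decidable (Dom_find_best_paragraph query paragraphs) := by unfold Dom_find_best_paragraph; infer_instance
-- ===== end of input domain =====

-- B replaces A's per-paragraph set-intersection loop by an inverted index (word -> paragraph
-- indices), a score array, and a final strict-max scan; an alternative decomposition, same results.


-- ===== PORT A =====
def find_best_paragraph (query : String) (paragraphs : List String) : String :=
  let query_words := PySem.Set.ofList (PySem.Str.split₀ (PySem.Str.lower query))
  let r := paragraphs.foldl (fun (st : Int × String) para =>
      let para_words := PySem.Set.ofList (PySem.Str.split₀ (PySem.Str.lower para))
      let score : Int := PySem.Set.len (PySem.Set.inter query_words para_words)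
      if score > st.1 then (score, para) else st)
    ((0 : Int), "Sorry, I don't know how to answer that yet.")
  r.2

-- ===== PORT B =====
def find_best_paragraph_alt (query : String) (paragraphs : List String) : String :=
  let index := (PySem.List.enumerate paragraphs 0).foldl
    (fun (d : PySem.Dict String (List Int)) ip =>
      (PySem.Set.ofList (PySem.Str.split₀ (PySem.Str.lower ip.2))).foldl
        (fun d w => d.insert w (d.getD w [] ++ [ip.1])) d)
    PySem.Dict.empty
  let scores := (PySem.Set.ofList (PySem.Str.split₀ (PySem.Str.lower query))).foldl
    (fun (sc : List Int) w =>
      (index.getD w []).foldl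
        (fun sc i => PySem.List.pySetD sc i (PySem.List.pyGetD sc i 0 + 1)) sc)
    (List.replicate paragraphs.length (0 : Int))
  let r := (scores.zip paragraphs).foldl
    (fun (st : Int × String) sp => if sp.1 > st.1 then (sp.1, sp.2) else st)
    ((0 : Int), "Sorry, I don't know how to answer that yet.")
  r.2

-- ===== PRECONDITION & SPEC =====
def Spec_find_best_paragraph (query : String) (paragraphs : List String) (out : String) : Prop := out = find_best_paragraph_alt query paragraphs
instance (query : String) (paragraphs : List String) (out : String) : Decidable (Spec_find_best_paragraph query paragraphs out) := by unfold Spec_find_best_paragraph; infer_instance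

-- ===== CLAIM (what is proved, stated in full; the proofs are below) =====
def Claim_equal_find_best_paragraph : Prop := ∀ (query : String) (paragraphs : List String), Dom_find_best_paragraph query paragraphs → Spec_find_best_paragraph query paragraphs (find_best_paragraph query paragraphs)

-- ===== LEMMAS AND PROOFS =====

-- distinct lowercase words of a paragraph/query
def pvWords (p : String) : List String := PySem.Set.ofList (PySem.Str.split₀ (PySem.Str.lower p))

-- the index builder of B
def pvIdx (L : List (Int × String)) (d : PySem.Dict String (List Int)) : PySem.Dict String (List Int) :=
  L.foldl (fun d ip => (pvWords ip.2).foldl (fun d w => d.insert w (d.getD w [] ++ [ip.1])) d) d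

-- the increment loop of B
def pvIncr (M : List Int) (sc : List Int) : List Int :=
  M.foldl (fun sc i => PySem.List.pySetD sc i (PySem.List.pyGetD sc i 0 + 1)) sc

-- the per-word index lists B ends up with
def pvIdxList (ps : List String) (w : String) : List Int :=
  ((PySem.List.enumerate ps 0).filter (fun ip => (pvWords ip.2).contains w)).map (·.1)

lemma pvInnerIdx (ws : List String) (d : PySem.Dict String (List Int)) (i : Int) (w : String)
    (h : ws.Nodup) :
    (ws.foldl (fun d v => d.insert v (d.getD v [] ++ [i])) d).getD w []
      = d.getD w [] ++ (if w ∈ ws then [i] else []) := by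
  induction ws generalizing d with
  | nil => simp
  | cons v ws ih =>
    have hnd := (List.nodup_cons.mp h)
    simp only [List.foldl_cons]
    rw [ih _ hnd.2]
    by_cases hw : w = v
    · subst hw
      rw [PySem.Dict.getD_insert_self]
      simp [hnd.1]
    · rw [PySem.Dict.getD_insert_of_ne _ _ _ hw]
      simp [List.mem_cons, hw]

lemma pvIdx_getD (L : List (Int × String)) (d : PySem.Dict String (List Int)) (w : String) :
    (pvIdx L d).getD w []
      = d.getD w [] ++ (L.filter (fun ip => (pvWords ip.2).contains w)).map (·.1) := by
  induction L generalizing d with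
  | nil => simp [pvIdx]
  | cons ip L ih =>
    simp only [pvIdx, List.foldl_cons] at *
    rw [ih]
    rw [pvInnerIdx (pvWords ip.2) d ip.1 w (PySem.Set.nodup_ofList _)]
    by_cases hc : (pvWords ip.2).contains w
    · have hm : w ∈ pvWords ip.2 := by simpa using hc
      simp [hm]
    · have hm : w ∉ pvWords ip.2 := by simpa using hc
      simp [hm]

lemma pvMem_idxList (ps : List String) (w : String) (i : Int) (h : i ∈ pvIdxList ps w) :
    ∃ (k : Nat) (hk : k < ps.length), i = (k : Int) ∧ (pvWords ps[k]).contains w := by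
  rcases List.mem_map.mp h with ⟨ip, hmem, hfst⟩
  rcases List.mem_filter.mp hmem with ⟨henum, hcont⟩
  rcases (PySem.List.mem_enumerate_iff _ _ _).mp henum with ⟨k, hk, hp⟩
  subst hp
  exact ⟨k, hk, by simpa using hfst.symm, by simpa using hcont⟩

lemma pvNodup_idxList (ps : List String) (w : String) : (pvIdxList ps w).Nodup := by
  have h1 := PySem.List.pairwise_lt_enumerate ps 0
  have h2 := h1.filter (fun ip => (pvWords ip.2).contains w)
  have h3 : (((PySem.List.enumerate ps 0).filter
      (fun ip => (pvWords ip.2).contains w)).map (·.1)).Pairwise (· < ·) :=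
    List.pairwise_map.mpr h2
  exact List.Pairwise.imp (fun h => ne_of_lt h) h3

lemma pvCount_idxList (ps : List String) (w : String) (j : Nat) (hj : j < ps.length) :
    (pvIdxList ps w).count ((j : Nat) : Int)
      = if (pvWords ps[j]).contains w then 1 else 0 := by
  by_cases hc : (pvWords ps[j]).contains w
  · have hmem : ((j : Nat) : Int) ∈ pvIdxList ps w := by
      apply List.mem_map.mpr
      refine ⟨((j : Int), ps[j]), List.mem_filter.mpr ⟨?_, by simpa using hc⟩, rfl⟩
      exact (PySem.List.mem_enumerate_iff _ _ _).mpr ⟨j, hj, by simp⟩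
    rw [if_pos hc]
    exact List.count_eq_one_of_mem (pvNodup_idxList ps w) hmem
  · have hnm : ((j : Nat) : Int) ∉ pvIdxList ps w := by
      intro hmem
      rcases pvMem_idxList ps w _ hmem with ⟨k, hk, hik, hkc⟩
      have hkj : k = j := by exact_mod_cast hik.symm
      subst hkj
      exact hc hkc
    rw [if_neg hc]
    exact List.count_eq_zero_of_not_mem hnm

lemma pvGetD_set (xs : List Int) (a j : Nat) (v : Int) (ha : a < xs.length) :
    (xs.set a v).getD j 0 = if j = a then v else xs.getD j 0 := by
  rw [List.getD_eq_getElem?_getD, List.getD_eq_getElem?_getD, List.getElem?_set]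
  by_cases h : j = a
  · subst h; simp [ha]
  · have h' : ¬ a = j := fun hh => h hh.symm
    simp [h, h']

lemma pvIncr_length (M : List Int) (sc : List Int) : (pvIncr M sc).length = sc.length := by
  induction M generalizing sc with
  | nil => rfl
  | cons i M ih =>
    show (pvIncr M _).length = _
    rw [ih, PySem.List.length_pySetD]

lemma pvIncr_getD (M : List Int) (sc : List Int) (j : Nat)
    (hb : ∀ i ∈ M, 0 ≤ i ∧ i < (sc.length : Int)) :
    (pvIncr M sc).getD j 0 = sc.getD j 0 + M.count ((j : Nat) : Int) := by
  induction M generalizing sc with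
  | nil => simp [pvIncr]
  | cons i M ih =>
    rcases hb i List.mem_cons_self with ⟨hi0, hilt⟩
    have hieq : i = ((i.toNat : Nat) : Int) := (Int.toNat_of_nonneg hi0).symm
    have hlt : i.toNat < sc.length := by omega
    have step : pvIncr (i :: M) sc = pvIncr M (sc.set i.toNat (sc.getD i.toNat 0 + 1)) := by
      show pvIncr M (PySem.List.pySetD sc i (PySem.List.pyGetD sc i 0 + 1)) = _
      rw [hieq, PySem.List.pySetD_natCast, PySem.List.pyGetD_natCast]
      simp only [Int.toNat_natCast]
    have hb' : ∀ x ∈ M, 0 ≤ x ∧ x < ((sc.set i.toNat (sc.getD i.toNat 0 + 1)).length : Int) := by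
      intro x hx
      have := hb x (List.mem_cons_of_mem _ hx)
      simpa using this
    rw [step, ih _ hb', pvGetD_set _ _ _ _ hlt, List.count_cons]
    by_cases hji : j = i.toNat
    · subst hji
      have hji' : ((i.toNat : Nat) : Int) = i := by omega
      simp only [hji', beq_self_eq_true]
      push_cast
      ring
    · have hji' : ¬ (((j : Nat) : Int) = i) := by omega
      have hji'' : ¬ (i = ((j : Nat) : Int)) := fun h => hji' h.symm
      simp [if_neg hji, beq_iff_eq, hji'']

lemma pvFold_words_length (W : List String) (Mf : String → List Int) (sc : List Int) :
    ((W.foldl (fun sc w => pvIncr (Mf w) sc) sc)).length = sc.length := by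
  induction W generalizing sc with
  | nil => rfl
  | cons w W ih => simp only [List.foldl_cons]; rw [ih, pvIncr_length]

lemma pvFold_words (W : List String) (Mf : String → List Int) (sc : List Int) (j : Nat)
    (hb : ∀ w, ∀ i ∈ Mf w, 0 ≤ i ∧ i < (sc.length : Int)) :
    (W.foldl (fun sc w => pvIncr (Mf w) sc) sc).getD j 0
      = sc.getD j 0 + (W.map (fun w => (Mf w).count ((j : Nat) : Int))).sum := by
  induction W generalizing sc with
  | nil => simp
  | cons w W ih =>
    simp only [List.foldl_cons, List.map_cons, List.sum_cons]
    have hb' : ∀ v, ∀ i ∈ Mf v, 0 ≤ i ∧ i < ((pvIncr (Mf w) sc).length : Int) := by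
      intro v i hi; rw [pvIncr_length]; exact hb v i hi
    rw [ih _ hb', pvIncr_getD _ _ _ (hb w)]
    push_cast
    ring

lemma pvSum_indicator (W : List String) (p : String → Bool) :
    (W.map (fun w => if p w then (1 : Nat) else 0)).sum = (W.filter p).length := by
  induction W with
  | nil => simp
  | cons w W ih =>
    by_cases h : p w
    · simp [h, ih]; omega
    · simp [h, ih]

lemma pvZipMapSelf {α β : Type} (f : α → β) (l : List α) :
    (l.map f).zip l = l.map (fun a => (f a, a)) := by
  induction l with
  | nil => rfl
  | cons a l ih => simp [ih]

lemma pvIdx_spec (ps : List String) (w : String) :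
    ((PySem.List.enumerate ps 0).foldl
      (fun (d : PySem.Dict String (List Int)) ip =>
        (PySem.Set.ofList (PySem.Str.split₀ (PySem.Str.lower ip.2))).foldl
          (fun d w => d.insert w (d.getD w [] ++ [ip.1])) d)
      PySem.Dict.empty).getD w [] = pvIdxList ps w := by
  have h := pvIdx_getD (PySem.List.enumerate ps 0) PySem.Dict.empty w
  simpa [pvIdx, pvWords, pvIdxList] using h

lemma pvScores_eq (qw : List String) (ps : List String) :
    (qw.foldl (fun (sc : List Int) w => pvIncr (pvIdxList ps w) sc)
      (List.replicate ps.length (0 : Int)))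
    = ps.map (fun p => (((qw.filter (fun w => (pvWords p).contains w)).length : Nat) : Int)) := by
  have hbound : ∀ w, ∀ i ∈ pvIdxList ps w,
      0 ≤ i ∧ i < ((List.replicate ps.length (0 : Int)).length : Int) := by
    intro w i hi
    rcases pvMem_idxList _ _ _ hi with ⟨k, hk, hik, -⟩
    subst hik
    simp only [List.length_replicate]
    omega
  apply List.ext_getElem
  · rw [pvFold_words_length]; simp
  · intro j h1 h2
    have hj : j < ps.length := by
      rwa [pvFold_words_length, List.length_replicate] at h1
    have hsc : (qw.foldl (fun (sc : List Int) w => pvIncr (pvIdxList ps w) sc)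
        (List.replicate ps.length (0 : Int))).getD j 0
        = (((qw.filter (fun w => (pvWords ps[j]).contains w)).length : Nat) : Int) := by
      rw [pvFold_words _ _ _ _ hbound]
      have h0 : (List.replicate ps.length (0 : Int)).getD j 0 = 0 := by
        rw [List.getD_eq_getElem?_getD]; simp [hj]
      rw [h0, List.map_congr_left (fun w _ => pvCount_idxList ps w j hj), pvSum_indicator]
      ring
    rw [List.getD_eq_getElem _ _ h1] at hsc
    rw [hsc, List.getElem_map]

set_option maxHeartbeats 1000000 in
theorem pv_main (query : String) (paragraphs : List String) :
    find_best_paragraph query paragraphs = find_best_paragraph_alt query paragraphs := by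
  have hfun : (fun (sc : List Int) w =>
      (((PySem.List.enumerate paragraphs 0).foldl
        (fun (d : PySem.Dict String (List Int)) ip =>
          (PySem.Set.ofList (PySem.Str.split₀ (PySem.Str.lower ip.2))).foldl
            (fun d w => d.insert w (d.getD w [] ++ [ip.1])) d)
        PySem.Dict.empty).getD w []).foldl
        (fun sc i => PySem.List.pySetD sc i (PySem.List.pyGetD sc i 0 + 1)) sc)
      = (fun (sc : List Int) w => pvIncr (pvIdxList paragraphs w) sc) := by
    funext sc w
    rw [pvIdx_spec]
    rfl
  simp only [find_best_paragraph, find_best_paragraph_alt]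
  rw [hfun, pvScores_eq, pvZipMapSelf, List.foldl_map]
  rfl

-- ===== VERDICT (by name: the statement is the Claim_ definition above) =====
theorem find_best_paragraph_spec : Claim_equal_find_best_paragraph := by
  intro query paragraphs _
  unfold Spec_find_best_paragraph
  exact pv_main query paragraphs
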